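-- pv_equiv track=rewrite | github.com/dmitrikaplan/ac_lab3 | klvm/Converter.py | exist_null_terminator
-- ===== SOURCE A (Python) =====
-- def int_to_binary(value: int, size: int = 64) -> str:
--     mask = (1 << size) - 1
--     if value < 0:
--         value = ((abs(value) ^ mask) + 1)
--         return bin(value & mask)[2:]
--
--     binary_representation = bin(value & mask)[2:]
--     return (size - len(binary_representation)) * '0' + bin(value & mask)[2:]
--
-- def exist_null_terminator(value: int) -> bool:
--     bin = int_to_binary(value)
--     start = 0
--     finish = 8
--     for i in range(0, 8):
--         if bin[start:finish] == '0' * 8: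
--             return True
--         start += 8
--         finish += 8
--
--     return False
-- ===== SOURCE B (Python) =====
-- def exist_null_terminator(value: int) -> bool:
--     masked = value & ((1 << 64) - 1)
--     return 0 in masked.to_bytes(8, 'big')
-- ===== Notes on version B (the rewrite author's own statement) =====
-- stated objective: idiomatic
-- what changed: Drops the hand-rolled binary-string builder and the 8-chunk string-slicing loop; B masks the value to 64 bits, converts it to an 8-byte big-endian bytes object, and tests 0-membership in it.
import Mathlib
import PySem

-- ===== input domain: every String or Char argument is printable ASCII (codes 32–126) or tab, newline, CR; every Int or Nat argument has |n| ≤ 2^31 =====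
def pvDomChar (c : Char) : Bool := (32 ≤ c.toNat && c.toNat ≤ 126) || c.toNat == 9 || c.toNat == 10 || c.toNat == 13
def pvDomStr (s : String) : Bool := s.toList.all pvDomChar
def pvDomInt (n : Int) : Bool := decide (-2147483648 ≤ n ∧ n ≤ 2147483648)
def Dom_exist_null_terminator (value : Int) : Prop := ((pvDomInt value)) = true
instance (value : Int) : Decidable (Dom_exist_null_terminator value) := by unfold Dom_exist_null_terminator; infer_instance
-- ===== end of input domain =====

-- B replaces A's binary-string building and 8-chunk string slicing by a bytes view of the
-- masked 64-bit value and a single membership test (objective: idiomatic).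

-- ===== PORT A =====
-- helper int_to_binary(value, size); strings are modelled as List Char
def int_to_binary (value : Int) (size : Int) : List Char :=
  let mask : Int := (1 <<< size.toNat) - 1      -- (1 << size) - 1; size is always the nonnegative 64 here
  if value < 0 then
    let value2 : Int := (PySem.Int.bxor ((value.natAbs : Int)) mask) + 1
    PySem.List.slice (PySem.Int.toBinChars0b (PySem.Int.band value2 mask)) (some 2) none
  else
    let br : List Char := PySem.List.slice (PySem.Int.toBinChars0b (PySem.Int.band value mask)) (some 2) none
    List.replicate ((size - (br.length : Int)).toNat) '0' ++
      PySem.List.slice (PySem.Int.toBinChars0b (PySem.Int.band value mask)) (some 2) none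

-- the 'for i in range(0, 8)' loop with its start/finish counters and early return
def entLoop (bin : List Char) : Int → Int → List Int → Bool
  | _, _, [] => false
  | start, finish, _ :: rest =>
    if PySem.List.slice bin (some start) (some finish) = List.replicate 8 '0' then true
    else entLoop bin (start + 8) (finish + 8) rest

def exist_null_terminator (value : Int) : Bool :=
  entLoop (int_to_binary value 64) 0 8 (PySem.List.pyRange 0 8 1)

-- ===== PORT B =====
def exist_null_terminator_alt (value : Int) : Bool :=
  let masked : Int := PySem.Int.band value ((1 <<< 64) - 1)
  -- masked.to_bytes(8, 'big') ported by hand: the eight big-endian bytes of masked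
  -- (exact here: 0 ≤ masked < 2^64 after the mask)
  let bytes : List Nat := (List.range 8).map (fun i => masked.toNat / 2 ^ (8 * (7 - i)) % 256)
  bytes.contains 0

-- ===== PRECONDITION & SPEC =====
def Spec_exist_null_terminator (value : Int) (out : Bool) : Prop := out = exist_null_terminator_alt value
instance (value : Int) (out : Bool) : Decidable (Spec_exist_null_terminator value out) := by unfold Spec_exist_null_terminator; infer_instance

-- ===== CLAIM (what is proved, stated in full; the proofs are below) =====
def Claim_equal_exist_null_terminator : Prop := ∀ (value : Int), Dom_exist_null_terminator value → Spec_exist_null_terminator value (exist_null_terminator value)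

-- ===== LEMMAS AND PROOFS =====

-- fixed-width big-endian binary representation of a Nat ('0'/'1' chars, k bits)
def fbits : Nat → Nat → List Char
  | 0, _ => []
  | k + 1, n => fbits k (n / 2) ++ [Nat.digitChar (n % 2)]

theorem fbits_length (k n : Nat) : (fbits k n).length = k := by
  induction k generalizing n with
  | zero => rfl
  | succ k ih => simp [fbits, ih]

theorem fbits_zero (k : Nat) : fbits k 0 = List.replicate k '0' := by
  induction k with
  | zero => rfl
  | succ k ih => simp [fbits, ih, List.replicate_succ', Nat.digitChar]

theorem fbits_all_zero (k n : Nat) : fbits k n = List.replicate k '0' ↔ n % 2 ^ k = 0 := by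
  induction k generalizing n with
  | zero => simp [fbits, Nat.mod_one]
  | succ k ih =>
    have h1 : n / 2 % 2 ^ k = n % 2 ^ (k + 1) / 2 := by
      rw [show (2:Nat) ^ (k + 1) = 2 * 2 ^ k by ring]
      exact (Nat.mod_mul_right_div_self n 2 (2 ^ k)).symm
    have h2 : n % 2 ^ (k + 1) % 2 = n % 2 := by
      rw [Nat.mod_mod_of_dvd _ (dvd_pow_self 2 (Nat.succ_ne_zero k))]
    have hsum : n % 2 ^ (k + 1) = 2 * (n % 2 ^ (k + 1) / 2) + n % 2 ^ (k + 1) % 2 :=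
      (Nat.div_add_mod _ 2).symm ▸ by omega
    constructor
    · intro h
      rw [fbits, List.replicate_succ'] at h
      have hlen : (fbits k (n / 2)).length = (List.replicate k '0').length := by
        simp [fbits_length]
      obtain ⟨ha, hb⟩ := List.append_inj h hlen
      have hz : n / 2 % 2 ^ k = 0 := (ih _).mp ha
      have hd : n % 2 = 0 := by
        rcases Nat.mod_two_eq_zero_or_one n with h0 | h1
        · exact h0
        · rw [h1] at hb; simp [Nat.digitChar] at hb
      omega
    · intro h
      have hz : n / 2 % 2 ^ k = 0 := by omega
      have hd : n % 2 = 0 := by omega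
      rw [fbits, List.replicate_succ', (ih _).mpr hz, hd]
      rfl

-- Python's bin digits are Nat.toDigits 2; its accumulator/fuel recursion characterised
theorem tdc_acc (fuel : Nat) : ∀ (n : Nat) (ds : List Char),
    Nat.toDigitsCore 2 fuel n ds = Nat.toDigitsCore 2 fuel n [] ++ ds := by
  induction fuel with
  | zero => intro n ds; simp [Nat.toDigitsCore]
  | succ fuel ih =>
    intro n ds
    simp only [Nat.toDigitsCore]
    by_cases h : n / 2 = 0
    · simp [h]
    · simp only [h, if_false]
      rw [ih (n / 2) ((n % 2).digitChar :: ds), ih (n / 2) [(n % 2).digitChar]]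
      simp

theorem tdc_fuel (n : Nat) : ∀ (f g : Nat) (ds : List Char), n < f → n < g →
    Nat.toDigitsCore 2 f n ds = Nat.toDigitsCore 2 g n ds := by
  induction n using Nat.strong_induction_on with
  | _ n ih =>
    intro f g ds hf hg
    match f, g with
    | f + 1, g + 1 =>
      simp only [Nat.toDigitsCore]
      by_cases h : n / 2 = 0
      · simp [h]
      · simp only [h, if_false]
        exact ih (n / 2) (Nat.div_lt_self (by omega) (by omega)) f g _ (by omega) (by omega)

theorem toDigits_two_rec (n : Nat) :
    Nat.toDigits 2 n = if n / 2 = 0 then [Nat.digitChar (n % 2)]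
      else Nat.toDigits 2 (n / 2) ++ [Nat.digitChar (n % 2)] := by
  show Nat.toDigitsCore 2 (n + 1) n [] = _
  simp only [Nat.toDigitsCore]
  by_cases h : n / 2 = 0
  · simp [h]
  · simp only [h, if_false]
    rw [tdc_fuel (n / 2) n (n / 2 + 1) _ (Nat.div_lt_self (by omega) (by omega)) (by omega)]
    rw [tdc_acc]
    rfl

-- zero-padding bin(n) to k bits gives the fixed-width representation
theorem toDigits_two_pad (k n : Nat) (hk : 1 ≤ k) (hn : n < 2 ^ k) :
    List.replicate (k - (Nat.toDigits 2 n).length) '0' ++ Nat.toDigits 2 n = fbits k n := by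
  induction k generalizing n with
  | zero => omega
  | succ k ih =>
    rw [toDigits_two_rec n]
    by_cases h : n / 2 = 0
    · simp only [h, if_true]
      rw [show fbits (k + 1) n = fbits k (n / 2) ++ [Nat.digitChar (n % 2)] from rfl, h, fbits_zero]
      simp
    · simp only [h, if_false]
      have hk1 : 1 ≤ k := by
        by_contra hc
        have : k = 0 := by omega
        subst this
        omega
      have hrec : n / 2 < 2 ^ k := by
        have := Nat.pow_succ 2 k ▸ hn
        omega
      have := ih (n / 2) hk1 hrec
      rw [show fbits (k + 1) n = fbits k (n / 2) ++ [Nat.digitChar (n % 2)] from rfl, ← this]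
      simp only [List.length_append, List.length_singleton]
      rw [show k + 1 - ((Nat.toDigits 2 (n / 2)).length + 1) = k - (Nat.toDigits 2 (n / 2)).length by omega]
      simp [List.append_assoc]

theorem toDigits_two_len_le (k n : Nat) (hk : 1 ≤ k) (hn : n < 2 ^ k) :
    (Nat.toDigits 2 n).length ≤ k := by
  have h := toDigits_two_pad k n hk hn
  have := congrArg List.length h
  simp [fbits_length] at this
  omega

theorem toDigits_two_len_ge (j : Nat) : ∀ n, 2 ^ j ≤ n → j + 1 ≤ (Nat.toDigits 2 n).length := by
  induction j with
  | zero =>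
    intro n hn
    rw [toDigits_two_rec n]
    split <;> simp
  | succ j ih =>
    intro n hn
    have h2 : 2 ^ j ≤ n / 2 := by
      rw [Nat.le_div_iff_mul_le (by omega)]
      have := Nat.pow_succ 2 j ▸ hn
      omega
    have hne : n / 2 ≠ 0 := by
      have : 1 ≤ 2 ^ j := Nat.one_le_two_pow
      omega
    rw [toDigits_two_rec n]
    simp only [hne, if_false, List.length_append, List.length_singleton]
    have := ih (n / 2) h2
    omega

-- xor with an all-ones mask is subtraction from the mask
theorem xor_mask (k x : Nat) (h : x < 2 ^ k) : x ^^^ (2 ^ k - 1) = 2 ^ k - 1 - x := by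
  have h1 : x ^^^ (2 ^ k - 1) = ((BitVec.ofNat k x) ^^^ (BitVec.allOnes k)).toNat := by
    rw [BitVec.toNat_xor]
    simp [BitVec.toNat_ofNat, BitVec.toNat_allOnes, Nat.mod_eq_of_lt h]
  rw [h1, BitVec.xor_allOnes, BitVec.toNat_not]
  simp [BitVec.toNat_ofNat, Nat.mod_eq_of_lt h]

-- the masked 64-bit value both programs work with
def pvM (value : Int) : Nat := if value < 0 then 2 ^ 64 - value.natAbs else value.toNat

theorem pvM_lt (value : Int) (h : Dom_exist_null_terminator value) : pvM value < 2 ^ 64 := by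
  simp [Dom_exist_null_terminator, pvDomInt] at h
  unfold pvM
  split <;> omega

theorem band_mask_eq (value : Int) (h : Dom_exist_null_terminator value) :
    PySem.Int.band value ((1 <<< 64) - 1) = (pvM value : Int) := by
  simp only [Dom_exist_null_terminator, pvDomInt, decide_eq_true_eq] at h
  obtain ⟨h1, h2⟩ := h
  have hm : (1 <<< 64 : Int) - 1 = ((2 ^ 64 - 1 : Nat) : Int) := by decide
  rw [hm]
  by_cases hv : 0 ≤ value
  · have : value = ((value.toNat : Nat) : Int) := by omega
    rw [this, PySem.Int.band_natCast]
    have hlt : value.toNat < 2 ^ 64 := by omega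
    rw [Nat.and_two_pow_sub_one_eq_mod, Nat.mod_eq_of_lt hlt]
    simp [pvM]
  · have hneg : value < 0 := by omega
    simp only [PySem.Int.band, if_neg (by omega : ¬ 0 ≤ value),
      if_pos (by omega : (0:Int) ≤ ((2 ^ 64 - 1 : Nat) : Int))]
    have ha : (-value - 1).toNat = value.natAbs - 1 := by omega
    have hmt : ((2 ^ 64 - 1 : Nat) : Int).toNat = 2 ^ 64 - 1 := by omega
    rw [ha, hmt, Nat.and_comm, Nat.and_two_pow_sub_one_eq_mod, Nat.mod_eq_of_lt (by omega)]
    simp [pvM, hneg]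
    omega

-- A's string is exactly the fixed 64-bit big-endian representation of the masked value
theorem int_to_binary_eq (value : Int) (h : Dom_exist_null_terminator value) :
    int_to_binary value 64 = fbits 64 (pvM value) := by
  simp only [Dom_exist_null_terminator, pvDomInt, decide_eq_true_eq] at h
  obtain ⟨h1, h2⟩ := h
  unfold int_to_binary
  have hsz : ((64:Int)).toNat = 64 := by decide
  rw [hsz]
  have hm : (1 <<< 64 : Int) - 1 = ((2 ^ 64 - 1 : Nat) : Int) := by decide
  by_cases hv : value < 0
  · simp only [if_pos hv, hm]
    have ha1 : 1 ≤ value.natAbs := by omega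
    have ha2 : value.natAbs < 2 ^ 64 := by omega
    have hx : PySem.Int.bxor ((value.natAbs : Nat) : Int) ((2 ^ 64 - 1 : Nat) : Int)
        = ((2 ^ 64 - 1 - value.natAbs : Nat) : Int) := by
      rw [PySem.Int.bxor_natCast, xor_mask 64 value.natAbs ha2]
    rw [hx]
    have hv2 : ((2 ^ 64 - 1 - value.natAbs : Nat) : Int) + 1 = ((2 ^ 64 - value.natAbs : Nat) : Int) := by
      push_cast; omega
    rw [hv2, PySem.Int.band_natCast, Nat.and_two_pow_sub_one_eq_mod,
        Nat.mod_eq_of_lt (by omega)]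
    have hnn : ¬ (((2 ^ 64 - value.natAbs : Nat) : Int) < 0) := by omega
    simp only [PySem.Int.toBinChars0b, if_neg hnn, Int.toNat_natCast]
    rw [PySem.List.slice_from _ (by norm_num)]
    show (Nat.toDigits 2 (2 ^ 64 - value.natAbs)) = fbits 64 (pvM value)
    have hge : 64 ≤ (Nat.toDigits 2 (2 ^ 64 - value.natAbs)).length := by
      have := toDigits_two_len_ge 63 (2 ^ 64 - value.natAbs) (by omega)
      omega
    have hpad := toDigits_two_pad 64 (2 ^ 64 - value.natAbs) (by omega) (by omega)
    rw [show (64 - (Nat.toDigits 2 (2 ^ 64 - value.natAbs)).length) = 0 by omega] at hpad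
    simp only [List.replicate_zero, List.nil_append] at hpad
    rw [hpad]
    simp only [pvM, if_pos hv]
  · simp only [if_neg hv, hm]
    have hval : value = ((value.toNat : Nat) : Int) := by omega
    rw [hval, PySem.Int.band_natCast, Nat.and_two_pow_sub_one_eq_mod,
        Nat.mod_eq_of_lt (by omega)]
    have hnn : ¬ (((value.toNat : Nat) : Int) < 0) := by omega
    simp only [PySem.Int.toBinChars0b, if_neg hnn, Int.toNat_natCast]
    rw [PySem.List.slice_from _ (by norm_num)]
    rw [show ((2:Int).toNat) = 2 from rfl]
    rw [show List.drop 2 ('0'::'b'::Nat.toDigits 2 value.toNat) = Nat.toDigits 2 value.toNat from rfl]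
    have hle := toDigits_two_len_le 64 value.toNat (by omega) (by omega)
    rw [show (((64:Int) - ((Nat.toDigits 2 value.toNat).length : Int)).toNat)
        = 64 - (Nat.toDigits 2 value.toNat).length by omega]
    rw [toDigits_two_pad 64 value.toNat (by omega) (by omega)]
    simp [pvM, hv]
    congr 1
    omega

-- splitting off bit windows of fbits
theorem fbits_split (a b : Nat) : ∀ n, fbits (a + b) n = fbits a (n / 2 ^ b) ++ fbits b (n % 2 ^ b) := by
  induction b with
  | zero => intro n; simp [fbits]
  | succ b ih =>
    intro n
    have e1 : n / 2 / 2 ^ b = n / 2 ^ (b + 1) := by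
      rw [Nat.div_div_eq_div_mul]; congr 1; ring
    have e2 : n / 2 % 2 ^ b = n % 2 ^ (b + 1) / 2 := by
      rw [show (2:Nat) ^ (b + 1) = 2 * 2 ^ b by ring]
      exact (Nat.mod_mul_right_div_self n 2 (2 ^ b)).symm
    have e3 : n % 2 ^ (b + 1) % 2 = n % 2 := Nat.mod_mod_of_dvd n (dvd_pow_self 2 (Nat.succ_ne_zero b))
    calc fbits (a + (b + 1)) n = fbits (a + b) (n / 2) ++ [Nat.digitChar (n % 2)] := rfl
      _ = (fbits a (n / 2 / 2 ^ b) ++ fbits b (n / 2 % 2 ^ b)) ++ [Nat.digitChar (n % 2)] := by rw [ih]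
      _ = fbits a (n / 2 ^ (b + 1)) ++ (fbits b (n % 2 ^ (b + 1) / 2) ++ [Nat.digitChar (n % 2 ^ (b + 1) % 2)]) := by
          rw [e1, e2, e3, List.append_assoc]
      _ = fbits a (n / 2 ^ (b + 1)) ++ fbits (b + 1) (n % 2 ^ (b + 1)) := rfl

theorem fbits_split_byte (j m : Nat) :
    fbits (8 + j) (m % 2 ^ (8 + j)) = fbits 8 (m / 2 ^ j % 256) ++ fbits j (m % 2 ^ j) := by
  rw [fbits_split 8 j]
  have e1 : m % 2 ^ (8 + j) / 2 ^ j = m / 2 ^ j % 256 := by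
    rw [show (2:Nat) ^ (8 + j) = 2 ^ j * 2 ^ 8 by rw [← pow_add]; ring_nf]
    rw [Nat.mod_mul_right_div_self]
    norm_num
  have e2 : m % 2 ^ (8 + j) % 2 ^ j = m % 2 ^ j :=
    Nat.mod_mod_of_dvd m (pow_dvd_pow 2 (by omega))
  rw [e1, e2]

theorem fbits_chunks (K : Nat) : ∀ m : Nat, fbits (8 * K) (m % 2 ^ (8 * K)) =
    (((List.range K).map (fun i => m / 2 ^ (8 * (K - 1 - i)) % 256)).map (fbits 8)).flatten := by
  induction K with
  | zero => intro m; simp [fbits]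
  | succ K ih =>
    intro m
    have e : 8 * (K + 1) = 8 + 8 * K := by ring
    rw [e, fbits_split_byte (8 * K) m, List.range_succ_eq_map]
    simp only [List.map_cons, List.map_map, List.flatten_cons]
    rw [ih m]
    congr 1
    rw [List.map_map]
    congr 1
    apply List.map_congr_left
    intro i _
    have hKi : K - 1 - i = K - (i + 1) := by omega
    simp [Function.comp, hKi]

-- the loop ignores a leading length-8 chunk once the window has moved past it
theorem entLoop_shift (c rest : List Char) (hc : c.length = 8) :
    ∀ (l : List Int) (s f : Int), 0 ≤ s → 0 ≤ f →
    entLoop (c ++ rest) (s + 8) (f + 8) l = entLoop rest s f l := by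
  intro l
  induction l with
  | nil => intro s f _ _; rfl
  | cons x xs ih =>
    intro s f hs hf
    show (if PySem.List.slice (c ++ rest) (some (s + 8)) (some (f + 8)) = List.replicate 8 '0' then true
        else entLoop (c ++ rest) (s + 8 + 8) (f + 8 + 8) xs) = _
    have hslice : PySem.List.slice (c ++ rest) (some (s + 8)) (some (f + 8))
        = PySem.List.slice rest (some s) (some f) := by
      rw [PySem.List.slice_toNat _ (by omega) (by omega), PySem.List.slice_toNat _ hs hf]
      have e1 : (s + 8).toNat = s.toNat + 8 := by omega
      have e2 : (f + 8).toNat = f.toNat + 8 := by omega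
      rw [e1, e2]
      have e3 : (c ++ rest).drop (s.toNat + 8) = rest.drop s.toNat := by
        rw [show s.toNat + 8 = 8 + s.toNat by omega, ← List.drop_drop,
            show (8:Nat) = c.length from hc.symm, List.drop_left]
      rw [e3, show f.toNat + 8 - (s.toNat + 8) = f.toNat - s.toNat by omega]
    rw [hslice]
    show _ = (if PySem.List.slice rest (some s) (some f) = List.replicate 8 '0' then true
        else entLoop rest (s + 8) (f + 8) xs)
    by_cases h : PySem.List.slice rest (some s) (some f) = List.replicate 8 '0'
    · simp [h]
    · simp only [h, if_false]
      exact ih (s + 8) (f + 8) (by omega) (by omega)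

-- the loop over the concatenated byte chunks is a membership scan over the bytes
theorem loop_chunks : ∀ (bytes : List Nat) (l : List Int), l.length = bytes.length →
    (∀ b ∈ bytes, b < 256) →
    entLoop ((bytes.map (fbits 8)).flatten) 0 8 l = bytes.contains 0 := by
  intro bytes
  induction bytes with
  | nil =>
    intro l hl _
    rw [List.length_nil, List.length_eq_zero_iff] at hl
    subst hl
    rfl
  | cons b bs ih =>
    intro l hl hlt
    match l with
    | x :: xs =>
      simp only [List.map_cons, List.flatten_cons]
      show (if PySem.List.slice (fbits 8 b ++ (bs.map (fbits 8)).flatten) (some 0) (some 8)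
          = List.replicate 8 '0' then true
        else entLoop (fbits 8 b ++ (bs.map (fbits 8)).flatten) (0 + 8) (8 + 8) xs) = _
      have hslice : PySem.List.slice (fbits 8 b ++ (bs.map (fbits 8)).flatten) (some 0) (some 8)
          = fbits 8 b := by
        rw [PySem.List.slice_toNat _ (by omega) (by omega)]
        rw [show ((0:Int).toNat) = 0 from rfl, show ((8:Int).toNat) = 8 from rfl]
        rw [List.drop_zero, Nat.sub_zero, List.take_left' (fbits_length 8 b)]
      rw [hslice]
      have hcond : (fbits 8 b = List.replicate 8 '0') ↔ b = 0 := by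
        rw [fbits_all_zero]
        constructor
        · intro h; have := hlt b (by simp); omega
        · intro h; simp [h]
      have hshift : entLoop (fbits 8 b ++ (bs.map (fbits 8)).flatten) (0 + 8) (8 + 8) xs
          = entLoop ((bs.map (fbits 8)).flatten) 0 8 xs :=
        entLoop_shift _ _ (fbits_length 8 b) xs 0 8 (by omega) (by omega)
      by_cases hb : b = 0
      · rw [if_pos (hcond.mpr hb)]
        simp [hb]
      · have hne : ¬ (fbits 8 b = List.replicate 8 '0') := fun h => hb (hcond.mp h)
        simp only [hne, if_false, hshift]
        rw [ih xs (by simpa using hl) (fun y hy => hlt y (by simp [hy]))]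
        simp
        intro h
        omega

theorem loop_eq (m : Nat) (h : m < 2 ^ 64) :
    entLoop (fbits 64 m) 0 8 (PySem.List.pyRange 0 8 1) =
      ((List.range 8).map (fun i => m / 2 ^ (8 * (7 - i)) % 256)).contains 0 := by
  have hdec : fbits 64 m = ((((List.range 8).map (fun i => m / 2 ^ (8 * (7 - i)) % 256)).map (fbits 8)).flatten) := by
    have := fbits_chunks 8 m
    rw [show (8 * 8 : Nat) = 64 from rfl, Nat.mod_eq_of_lt h] at this
    rw [this]
  rw [hdec]
  apply loop_chunks
  · rfl
  · intro b hb
    simp only [List.mem_map] at hb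
    obtain ⟨i, _, rfl⟩ := hb
    exact Nat.mod_lt _ (by omega)

-- ===== VERDICT (by name: the statement is the Claim_ definition above) =====
theorem exist_null_terminator_spec : Claim_equal_exist_null_terminator := by
  intro value hdom
  unfold Spec_exist_null_terminator exist_null_terminator exist_null_terminator_alt
  rw [int_to_binary_eq value hdom, band_mask_eq value hdom]
  rw [loop_eq (pvM value) (pvM_lt value hdom)]
  simp
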